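-- pv_equiv track=rewrite | github.com/soldiers1989/trade-1 | app/svc/tms/amds/data/level5/emoney/path.py | _getse
-- ===== SOURCE A (Python) =====
-- def _getse(code):
--     """
--         get securities exchange of specified stock by code
--     :param code: str, stock code
--     :return:
--         sz, sh or None
--     """
--     # stock code rules
--     codes = {
--         "sh": ['600','601','603'],
--         "sz": ['000','002','300']
--     }
--
--     if len(code) < 3:
--         return None
--
--     code = code[:3]
--     for se in codes.keys():
--         if code in codes[se]:
--             return se
--
--     return None
-- ===== SOURCE B (Python) =====
-- _TABLE = {'600': 'sh', '601': 'sh', '603': 'sh',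
--           '000': 'sz', '002': 'sz', '300': 'sz'}
--
--
-- def _getse(code):
--     """
--         get securities exchange of specified stock by code
--     :param code: str, stock code
--     :return:
--         sz, sh or None
--     """
--     return _TABLE.get(code[:3])
-- ===== Notes on version B (the rewrite author's own statement) =====
-- stated objective: idiomatic
-- what changed: Replaces the length guard plus loop over exchanges with inner list-membership scans by a single precomputed inverted table keyed by the 3-char prefix, looked up once with dict.get; short/unknown prefixes are simply absent and yield None.
import Mathlib
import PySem

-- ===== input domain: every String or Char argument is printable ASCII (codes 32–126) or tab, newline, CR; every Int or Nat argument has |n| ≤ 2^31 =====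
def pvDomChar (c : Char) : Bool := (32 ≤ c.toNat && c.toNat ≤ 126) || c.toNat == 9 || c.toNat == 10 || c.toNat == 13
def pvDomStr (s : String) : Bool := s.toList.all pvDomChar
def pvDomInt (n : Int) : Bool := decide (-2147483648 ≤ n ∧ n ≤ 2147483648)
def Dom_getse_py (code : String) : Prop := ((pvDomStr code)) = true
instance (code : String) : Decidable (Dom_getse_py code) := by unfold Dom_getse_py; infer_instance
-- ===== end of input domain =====

-- B replaces A's loop over exchanges (with an inner list-membership scan) by one
-- inverted prefix→exchange table and a single lookup (objective: idiomatic).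

-- ===== PORT A =====
-- the 'for se in codes.keys(): if code in codes[se]: return se' loop
def getseLoop (codes : PySem.Dict String (List String)) (code3 : String) :
    List String → Option String
  | [] => none
  | se :: rest =>
      if (codes.getD se []).contains code3 then some se
      else getseLoop codes code3 rest

def getse_py (code : String) : Option String :=
  let codes : PySem.Dict String (List String) :=
    PySem.Dict.ofList [("sh", ["600", "601", "603"]), ("sz", ["000", "002", "300"])]
  if PySem.Str.len code < 3 then none
  else
    let code3 := PySem.Str.slice code none (some 3)
    getseLoop codes code3 codes.keys

-- ===== PORT B =====
def getseTable : PySem.Dict String String :=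
  PySem.Dict.ofList
    [("600", "sh"), ("601", "sh"), ("603", "sh"),
     ("000", "sz"), ("002", "sz"), ("300", "sz")]

def getse_py_alt (code : String) : Option String :=
  getseTable.get? (PySem.Str.slice code none (some 3))

-- ===== PRECONDITION & SPEC =====
def Spec_getse_py (code : String) (out : Option String) : Prop := out = getse_py_alt code
instance (code : String) (out : Option String) : Decidable (Spec_getse_py code out) := by unfold Spec_getse_py; infer_instance

-- ===== CLAIM (what is proved, stated in full; the proofs are below) =====
def Claim_equal_getse_py : Prop := ∀ (code : String), Dom_getse_py code → Spec_getse_py code (getse_py code)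

-- ===== LEMMAS AND PROOFS =====

-- the literal dicts, in explicit item-list form
theorem getseTable_mk : getseTable = PySem.Dict.mk
    [("600", "sh"), ("601", "sh"), ("603", "sh"),
     ("000", "sz"), ("002", "sz"), ("300", "sz")] := by decide

theorem getseCodes_mk :
    (PySem.Dict.ofList [("sh", ["600", "601", "603"]), ("sz", ["000", "002", "300"])] :
      PySem.Dict String (List String))
    = PySem.Dict.mk [("sh", ["600", "601", "603"]), ("sz", ["000", "002", "300"])] := by decide

-- the loop body and the table lookup agree on every candidate prefix
theorem getse_core (p : String) :
    (if ["600", "601", "603"].contains p then some "sh"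
     else if ["000", "002", "300"].contains p then some "sz" else none)
    = getseTable.get? p := by
  rw [getseTable_mk]
  by_cases h0 : p = "600"; · subst h0; decide
  by_cases h1 : p = "601"; · subst h1; decide
  by_cases h2 : p = "603"; · subst h2; decide
  by_cases h3 : p = "000"; · subst h3; decide
  by_cases h4 : p = "002"; · subst h4; decide
  by_cases h5 : p = "300"; · subst h5; decide
  have g0 : ¬("600" = p) := fun e => h0 e.symm
  have g1 : ¬("601" = p) := fun e => h1 e.symm
  have g2 : ¬("603" = p) := fun e => h2 e.symm
  have g3 : ¬("000" = p) := fun e => h3 e.symm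
  have g4 : ¬("002" = p) := fun e => h4 e.symm
  have g5 : ¬("300" = p) := fun e => h5 e.symm
  rw [PySem.Dict.get?_mk_cons, PySem.Dict.get?_mk_cons, PySem.Dict.get?_mk_cons,
      PySem.Dict.get?_mk_cons, PySem.Dict.get?_mk_cons, PySem.Dict.get?_mk_cons]
  simp [PySem.Dict.get?, h0, h1, h2, h3, h4, h5, g0, g1, g2, g3, g4, g5]

-- a prefix shorter than 3 characters is absent from the table
theorem getse_short (p : String) (h : p.toList.length < 3) :
    getseTable.get? p = none := by
  have hne : ∀ q : String, q.toList.length = 3 → ¬ (q = p) := by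
    rintro q hq rfl; omega
  rw [getseTable_mk,
      PySem.Dict.get?_mk_cons, PySem.Dict.get?_mk_cons, PySem.Dict.get?_mk_cons,
      PySem.Dict.get?_mk_cons, PySem.Dict.get?_mk_cons, PySem.Dict.get?_mk_cons]
  simp [PySem.Dict.get?,
    (hne "600" (by decide)), (hne "601" (by decide)), (hne "603" (by decide)),
    (hne "000" (by decide)), (hne "002" (by decide)), (hne "300" (by decide))]

-- the slice code[:3] is a take of the character list
theorem getse_take (code : String) :
    (PySem.Str.slice code none (some 3)).toList = code.toList.take 3 := by
  have h := PySem.List.slice_to (xs := code.toList) (b := (3 : Int)) (by norm_num)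
  simp [PySem.Str.toList_slice] at *
  exact h

-- ===== VERDICT (by name: the statement is the Claim_ definition above) =====
theorem getse_py_spec : Claim_equal_getse_py := by
  intro code _
  unfold Spec_getse_py getse_py getse_py_alt
  rw [getseCodes_mk]
  by_cases h : PySem.Str.len code < 3
  · simp only [h, if_true]
    have hl : PySem.Str.len code = (code.toList.length : Int) := by
      simp [String.length_toList]
    have hlt : (PySem.Str.slice code none (some 3)).toList.length < 3 := by
      rw [getse_take, List.length_take]; omega
    exact (getse_short _ hlt).symm
  · simp only [h, if_false]
    rw [← getse_core]
    simp [getseLoop, PySem.Dict.getD, PySem.Dict.get?, PySem.Dict.keys]
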